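-- pv_equiv track=rewrite | github.com/TataOwO/ntut-programming-I | P18.py | createFish
-- ===== SOURCE A (Python) =====
-- def createTriangle(size, start=1, fillin="*", filler=" "):
--     outputArray = []
--     for c in range(start, size+1):
--         text = ""
--         text += fillin*c
--         text += filler*(size-c)
--         outputArray.append(text)
--     return outputArray
--
-- def createPyramid(size, fillin="*", filler="#"):
--     rSide = createTriangle(size  , 1, fillin, filler)
--     lSide = createTriangle(size-1, 0, fillin, filler)
--     lSide = ["".join(list(reversed(x))) for x in lSide]
--     output = list(zip(lSide, rSide))
--     output = ["".join(x) for x in output]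
--     return output
--
-- def createDiamond(size, fillin="*", filler=" "):
--     size = int(size/2)
--     upSide   = createPyramid(size+1, fillin, filler)
--     downSide = createPyramid(size  , fillin, filler)
--     downSide = [" "+x+" " for x in downSide]
--
--     downSide.reverse()
--     output = upSide + downSide
--     return output
--
-- def createFish(size, fillin="*", filler=" "):
--     diamond = createDiamond(size, fillin, filler)
--
--     size = int(size/2)
--     tail = []
--
--     upTail   = createTriangle(size  , 1, "-", filler)
--     downTail = createTriangle(size-1, 0, "-", filler)
--     downTail.reverse()
--
--     upTail   = [    x[::-1] for x in upTail]
--     downTail = [" "+x[::-1] for x in downTail]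
--
--     tail.append(filler*size)
--     tail.extend(upTail)
--     tail.extend(downTail)
--     tail.append(filler*size)
--
--     output = list(zip(diamond, tail))
--     output = ["".join(x) for x in output]
--     return output
-- ===== SOURCE B (Python) =====
-- def createFish(size, fillin="*", filler=" "):
--     # Build each row by mirroring: make the right wing, reflect it for the left,
--     # and append the tail wedge (a reflected right-pointing wedge).
--     h = int(size / 2)
--     rows = []
--     for i in range(h + 1):  # upper half, widening to the middle row
--         wing = fillin * i + filler * (h - i)
--         tail = filler * h if i == 0 else ("-" * i + filler * (h - i))[::-1]
--         rows.append(wing[::-1] + fillin + wing + tail)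
--     for i in range(h - 1, -1, -1):  # lower half, narrowing, inset by one space
--         wing = fillin * i + filler * (h - 1 - i)
--         tail = " " + ("-" * i + filler * (h - 1 - i))[::-1]
--         rows.append(" " + wing[::-1] + fillin + wing + " " + tail)
--     return rows
-- ===== Notes on version B (the rewrite author's own statement) =====
-- stated objective: simpler
-- what changed: B emits each fish row directly in one pass per row index, building the right wing and tail wedge and mirroring them with string reversal, instead of composing triangles into pyramids, a diamond and a separate tail list and zipping the pieces together.
import Mathlib
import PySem

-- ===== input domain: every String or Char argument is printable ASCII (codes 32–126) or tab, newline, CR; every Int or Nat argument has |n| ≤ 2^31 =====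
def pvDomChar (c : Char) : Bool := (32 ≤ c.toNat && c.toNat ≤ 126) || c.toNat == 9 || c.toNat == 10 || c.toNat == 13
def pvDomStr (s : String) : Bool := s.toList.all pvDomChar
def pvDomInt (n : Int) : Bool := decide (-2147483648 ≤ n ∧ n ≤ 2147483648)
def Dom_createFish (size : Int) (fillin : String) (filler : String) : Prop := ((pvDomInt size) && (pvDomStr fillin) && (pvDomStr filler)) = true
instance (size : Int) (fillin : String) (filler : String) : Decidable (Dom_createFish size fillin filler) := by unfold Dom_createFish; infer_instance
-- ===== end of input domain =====

-- B emits each fish row directly (right wing + tail wedge, mirrored by string reversal)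
-- in one pass per row, instead of composing triangles into pyramids, a diamond and a
-- tail list and zipping them (objective: simpler).

-- ===== PORT A =====
-- rows are kept as List Char; joined to String only at the end ("".join / str concat)
-- createTriangle: the for-loop appending fillin*c + filler*(size-c)
def pvTriangle (size start : Int) (fi fl : List Char) : List (List Char) :=
  (PySem.List.pyRange start (size + 1)).foldl (fun acc c =>
    acc ++ [PySem.List.pyRepeat fi c ++ PySem.List.pyRepeat fl (size - c)]) []

-- createPyramid
def pvPyramid (size : Int) (fi fl : List Char) : List (List Char) :=
  let rSide := pvTriangle size 1 fi fl
  let lSide := (pvTriangle (size - 1) 0 fi fl).map (fun x => x.reverse)  -- "".join(list(reversed(x)))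
  ((lSide.zip rSide).map (fun x => x.1 ++ x.2))

-- createDiamond; int(size/2) is exact float division on |size| ≤ 2^31, i.e. truncation = truncdiv
def pvDiamond (size : Int) (fi fl : List Char) : List (List Char) :=
  let s := PySem.Int.truncdiv size 2
  let upSide := pvPyramid (s + 1) fi fl
  let downSide := ((pvPyramid s fi fl).map (fun x => [' '] ++ x ++ [' '])).reverse
  upSide ++ downSide

def createFish (size : Int) (fillin : String) (filler : String) : List String :=
  let fi := fillin.toList
  let fl := filler.toList
  let diamond := pvDiamond size fi fl
  let s := PySem.Int.truncdiv size 2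
  let upTail := (pvTriangle s 1 ['-'] fl).map (fun x => x.reverse)             -- x[::-1]
  let downTail := ((pvTriangle (s - 1) 0 ['-'] fl).reverse).map (fun x => ' ' :: x.reverse)
  let tail := ([PySem.List.pyRepeat fl s] ++ upTail ++ downTail) ++ [PySem.List.pyRepeat fl s]
  ((diamond.zip tail).map (fun x => x.1 ++ x.2)).map (fun cs => String.ofList cs)

-- ===== PORT B =====
-- Source B: two row-index loops; each row = mirrored wing + fillin + wing + tail wedge
def createFish_alt (size : Int) (fillin : String) (filler : String) : List String :=
  let h := PySem.Int.truncdiv size 2      -- int(size / 2), exact truncation on |size| ≤ 2^31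
  let fi := fillin.toList
  let fl := filler.toList
  -- for i in range(h + 1): upper half, widening to the middle row
  let up := (PySem.List.pyRange 0 (h + 1) 1).foldl (fun acc i =>
    let wing := PySem.List.pyRepeat fi i ++ PySem.List.pyRepeat fl (h - i)
    let tail := if i = 0 then PySem.List.pyRepeat fl h
                else (PySem.List.pyRepeat ['-'] i ++ PySem.List.pyRepeat fl (h - i)).reverse
    acc ++ [wing.reverse ++ fi ++ wing ++ tail]) []
  -- for i in range(h - 1, -1, -1): lower half, narrowing, inset by one space
  let rows := (PySem.List.pyRange (h - 1) (-1) (-1)).foldl (fun acc i =>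
    let wing := PySem.List.pyRepeat fi i ++ PySem.List.pyRepeat fl (h - 1 - i)
    let tail := [' '] ++ (PySem.List.pyRepeat ['-'] i ++ PySem.List.pyRepeat fl (h - 1 - i)).reverse
    acc ++ [[' '] ++ wing.reverse ++ fi ++ wing ++ [' '] ++ tail]) up
  rows.map (fun cs => String.ofList cs)

-- ===== PRECONDITION & SPEC =====
def Spec_createFish (size : Int) (fillin : String) (filler : String) (out : List String) : Prop := out = createFish_alt size fillin filler
instance (size : Int) (fillin : String) (filler : String) (out : List String) : Decidable (Spec_createFish size fillin filler out) := by unfold Spec_createFish; infer_instance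

-- ===== CLAIM (what is proved, stated in full; the proofs are below) =====
def Claim_equal_createFish : Prop := ∀ (size : Int) (fillin : String) (filler : String), Dom_createFish size fillin filler → Spec_createFish size fillin filler (createFish size fillin filler)

-- ===== LEMMAS AND PROOFS =====

def pvRepN (cs : List Char) (m : Nat) : List Char := (List.replicate m cs).flatten

theorem pvRepN_zero (cs : List Char) : pvRepN cs 0 = [] := rfl

theorem pvRange_nil {a b : Int} (h : b ≤ a) : PySem.List.pyRange a b = [] := by
  rw [PySem.List.pyRange_of_pos a b Int.one_pos, if_neg (by omega)]
  simp

theorem pvRepeat_eq (cs : List Char) (i : Int) :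
    PySem.List.pyRepeat cs i = pvRepN cs i.toNat := rfl

theorem pvRepN_succ (cs : List Char) (m : Nat) :
    pvRepN cs (m + 1) = cs ++ pvRepN cs m := by
  simp [pvRepN, List.replicate_succ]

theorem pvRepN_reverse (cs : List Char) (m : Nat) :
    (pvRepN cs m).reverse = pvRepN cs.reverse m := by
  induction m with
  | zero => simp [pvRepN]
  | succ k ih =>
    have h2 : pvRepN cs.reverse (k + 1) = pvRepN cs.reverse k ++ cs.reverse := by
      simp [pvRepN, List.replicate_succ']
    rw [pvRepN_succ, h2, List.reverse_append, ih]

theorem pvRepN_single (a : Char) (m : Nat) : pvRepN [a] m = List.replicate m a := by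
  induction m with
  | zero => rfl
  | succ k ih => simp [pvRepN, List.replicate_succ]

theorem pvRange_reverse (n : Nat) :
    (List.range n).reverse = (List.range n).map (fun k => n - 1 - k) := by
  induction n with
  | zero => rfl
  | succ k ih =>
    conv_lhs => rw [List.range_succ]
    conv_rhs => rw [List.range_succ_eq_map]
    rw [List.reverse_append, ih]
    simp only [List.reverse_singleton, List.singleton_append, List.map_cons, List.map_map]
    congr 1
    apply List.map_congr_left
    intro j hj
    simp only [Function.comp, Nat.succ_eq_add_one]
    omega

theorem pvTriangle_one (n : Nat) (fi fl : List Char) :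
    pvTriangle (n : Int) 1 fi fl
      = (List.range n).map (fun j => pvRepN fi (j + 1) ++ pvRepN fl (n - 1 - j)) := by
  unfold pvTriangle
  rw [PySem.List.foldl_append_singleton_eq_map]
  rw [PySem.List.pyRange_of_pos 1 ((n : Int) + 1) Int.one_pos]
  rcases Nat.eq_zero_or_pos n with h | h
  · subst h; simp
  · rw [if_pos (by omega)]
    have : (((n : Int) + 1 - 1 + 1 - 1) / 1).toNat = n := by omega
    rw [this, List.map_map, List.nil_append]
    apply List.map_congr_left
    intro j hj
    rw [List.mem_range] at hj
    simp only [Function.comp, pvRepeat_eq]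
    congr 2
    all_goals omega

theorem pvTriangle_zero (n : Nat) (fi fl : List Char) :
    pvTriangle ((n : Int) - 1) 0 fi fl
      = (List.range n).map (fun j => pvRepN fi j ++ pvRepN fl (n - 1 - j)) := by
  unfold pvTriangle
  rw [PySem.List.foldl_append_singleton_eq_map]
  have hb : (n : Int) - 1 + 1 = (n : Int) := by ring
  rw [hb, PySem.List.pyRange_zero_natCast, List.map_map, List.nil_append]
  apply List.map_congr_left
  intro j hj
  rw [List.mem_range] at hj
  simp only [Function.comp, pvRepeat_eq]
  congr 2
  all_goals omega

theorem pvPyramid_nf (m : Nat) (fi fl : List Char) :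
    pvPyramid (m : Int) fi fl
      = (List.range m).map (fun j =>
          pvRepN fl.reverse (m - 1 - j) ++ pvRepN fi.reverse j
            ++ (pvRepN fi (j + 1) ++ pvRepN fl (m - 1 - j))) := by
  simp only [pvPyramid, pvTriangle_one m fi fl, pvTriangle_zero m fi fl,
    List.map_map, List.zip_map', Function.comp]
  apply List.map_congr_left
  intro j hj
  simp [pvRepN_reverse, List.append_assoc]

theorem pvPyramid_nonpos {m : Int} (hm : m ≤ 0) (fi fl : List Char) :
    pvPyramid m fi fl = [] := by
  unfold pvPyramid pvTriangle
  rw [pvRange_nil (a := 1) (b := m + 1) (by omega)]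
  simp

theorem createFish_eq_alt (size : Int) (fillin filler : String) :
    createFish size fillin filler = createFish_alt size fillin filler := by
  simp only [createFish, createFish_alt, pvDiamond]
  generalize PySem.Int.truncdiv size 2 = h
  by_cases hneg : h < 0
  · rw [pvPyramid_nonpos (by omega), pvPyramid_nonpos (by omega),
      PySem.List.pyRange_one_eq_nil (by omega), PySem.List.pyRange_neg_one_eq_nil (by omega)]
    simp
  · lift h to Nat using (by omega) with n
    -- normalize A's side
    rw [show ((n : Int) + 1) = (((n + 1 : Nat)) : Int) by push_cast; ring]
    rw [pvPyramid_nf (n + 1), pvPyramid_nf n,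
        pvTriangle_one n ['-'] filler.toList,
        pvTriangle_zero n ['-'] filler.toList]
    -- normalize B's side
    rw [PySem.List.pyRange_one (0 : Int) (((n + 1 : Nat)) : Int),
        PySem.List.pyRange_neg_one ((n : Int) - 1) (-1)]
    simp only [Int.toNat_natCast, pvRepeat_eq, PySem.List.foldl_append_singleton_eq_map,
      List.nil_append, List.map_map,
      show ((((n + 1 : Nat)) : Int) - 0).toNat = n + 1 by omega,
      show ((n : Int) - 1 - (-1)).toNat = n by omega]
    rw [List.map_append]
    simp only [← List.map_reverse, pvRange_reverse, List.map_map, Nat.add_sub_cancel]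
    apply List.ext_getElem
    · simp [Nat.min_def]; omega
    · intro i h1 h2
      simp only [List.getElem_map, List.getElem_zip, List.getElem_append, List.getElem_cons,
        List.getElem_range, Function.comp_apply, List.length_map, List.length_range,
        List.length_append, List.length_cons, List.singleton_append]
      simp only [List.length_map, List.length_append, List.length_range] at h2
      by_cases hi : i < n + 1
      · simp only [dif_pos hi, dif_pos (show i < n + 1 + n by omega)]
        have e0 : ((0 : Int) + (i : Int)) = (i : Int) := by ring
        rw [e0]
        by_cases hi0 : i = 0
        · subst hi0
          simp [List.reverse_append, pvRepN_reverse, pvRepN_succ, pvRepN_zero,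
            List.append_assoc]
        · have hiz : ¬ ((i : Int) = 0) := by exact_mod_cast hi0
          simp only [dif_neg hi0, if_neg hiz]
          have e1 : i - 1 + 1 = i := by omega
          have e2 : n - 1 - (i - 1) = n - i := by omega
          have e3 : ((i : Int)).toNat = i := by omega
          have e4 : ((n : Int) - (i : Int)).toNat = n - i := by omega
          rw [e1, e2, e3, e4, pvRepN_succ]
          simp [pvRepN_reverse, pvRepN_single, List.reverse_append, List.append_assoc]
      · simp only [dif_neg hi, dif_pos (show i < n + 1 + n by omega)]
        have eA : n - 1 - (n - 1 - (i - (n + 1))) = i - n - 1 := by omega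
        have eB : n - 1 - (i - (n + 1)) = n - 1 - (i - n - 1) := by omega
        have eC : n - 1 - (i - n - 1) + 1 = n - (i - n - 1) := by omega
        rw [eA, eB, eC]
        -- B's lower-loop value at position k = i - (n+1) is ((n:Int)-1) - k
        have f1 : (((n : Int) - 1) - ((i - (n + 1) : Nat) : Int)).toNat = n - 1 - (i - n - 1) := by omega
        have f2 : ((n : Int) - 1 - (((n : Int) - 1) - ((i - (n + 1) : Nat) : Int))).toNat = i - n - 1 := by omega
        rw [f1, f2]
        simp only [pvRepN_reverse, pvRepN_single, List.reverse_append, List.append_assoc,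
          List.reverse_replicate, List.reverse_cons, List.nil_append, List.cons_append]
        rw [← eC, pvRepN_succ]
        simp [List.append_assoc]

-- ===== VERDICT (by name: the statement is the Claim_ definition above) =====
theorem createFish_spec : Claim_equal_createFish := by
  intro size fillin filler _
  unfold Spec_createFish
  exact createFish_eq_alt size fillin filler
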